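-- pv_equiv track=rewrite | github.com/Yashrocky96/DSA | DSA-1/Simple-Math/numberOfDivisorsAndSum.py | numberOfDivisorsAndSum
-- ===== SOURCE A (Python) =====
-- def numberOfDivisorsAndSum(n):
--     factors = set()
--     i = 1
--     while (i**2) <= n:
--         if n % i == 0:
--             factors.add(i)
--             factors.add(n//i)
--         i += 1
--     out = [len(factors), sum(factors)]
--     return out
-- ===== SOURCE B (Python) =====
-- def numberOfDivisorsAndSum(n):
--     if n <= 0:
--         return [0, 0]
--     count = 1
--     total = 1
--     m = n
--     p = 2
--     while p * p <= m:
--         if m % p == 0: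
--             e = 0
--             pk = 1
--             while m % p == 0:
--                 m //= p
--                 e += 1
--                 pk *= p
--             count *= e + 1
--             total *= (pk * p - 1) // (p - 1)
--         p += 1
--     if m > 1:
--         count *= 2
--         total *= m + 1
--     return [count, total]
-- ===== Notes on version B (the rewrite author's own statement) =====
-- stated objective: alternative
-- what changed: Instead of enumerating divisor pairs {i, n//i} up to sqrt(n) into a set and taking len/sum, B computes the prime factorization of n by trial division on the shrinking cofactor and combines the divisor count and divisor sum multiplicatively: count = prod(e_i+1), sum = prod((p_i^(e_i+1)-1)/(p_i-1)).
import Mathlib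
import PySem

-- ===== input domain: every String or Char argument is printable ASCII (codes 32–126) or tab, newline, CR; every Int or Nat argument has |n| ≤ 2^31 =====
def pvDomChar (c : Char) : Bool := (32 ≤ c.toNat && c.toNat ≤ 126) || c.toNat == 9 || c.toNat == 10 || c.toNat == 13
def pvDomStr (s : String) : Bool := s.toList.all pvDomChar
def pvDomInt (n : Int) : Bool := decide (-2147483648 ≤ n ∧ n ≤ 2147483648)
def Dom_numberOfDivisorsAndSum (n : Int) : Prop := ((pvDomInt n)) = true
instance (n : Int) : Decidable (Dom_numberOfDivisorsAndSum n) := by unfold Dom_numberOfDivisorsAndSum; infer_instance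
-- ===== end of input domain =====

-- B replaces A's sqrt(n) divisor-pair enumeration (a set of {i, n//i}, then len/sum) by prime
-- factorization with the multiplicative formulas count = prod (e+1), sum = prod ((p^(e+1)-1)/(p-1)).

-- ===== PORT A =====
-- the while loop: while i**2 <= n, add i and n//i to factors when n % i == 0.
-- fuel only makes the recursion structural: the top-level call passes enough for
-- every iteration (the loop stops at i > n since i**2 <= n forces i <= n).
def numberOfDivisorsAndSumLoop (n : Int) (factors : PySem.Set Int) (i : Int) : Nat → PySem.Set Int
  | 0 => factors
  | fuel + 1 =>
    if i ^ 2 ≤ n then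
      numberOfDivisorsAndSumLoop n
        (if PySem.Int.mod n i == 0 then
          PySem.Set.add (PySem.Set.add factors i) (PySem.Int.floordiv n i)
        else factors) (i + 1) fuel
    else factors

def numberOfDivisorsAndSum (n : Int) : List Int :=
  let factors := numberOfDivisorsAndSumLoop n PySem.Set.empty 1 (n.toNat + 1)
  [(factors.length : Int), factors.foldl (· + ·) 0]

-- ===== PORT B =====
-- inner while: while m % p == 0: m //= p; e += 1; pk *= p   (returns (m, e, pk));
-- fuel m.toNat is enough: each pass divides m (≥ 2 here) by p ≥ 2.
def pvAltInner (p : Int) (m e pk : Int) : Nat → Int × Int × Int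
  | 0 => (m, e, pk)
  | fuel + 1 =>
    if PySem.Int.mod m p == 0 then
      pvAltInner p (PySem.Int.floordiv m p) (e + 1) (pk * p) fuel
    else (m, e, pk)

-- outer while: while p*p <= m, strip p's power and multiply the accumulators;
-- fuel n.toNat + 1 is enough: the loop exits once p exceeds every remaining m.
def pvAltOuter (count total m p : Int) : Nat → Int × Int × Int
  | 0 => (count, total, m)
  | fuel + 1 =>
    if p * p ≤ m then
      if PySem.Int.mod m p == 0 then
        let r := pvAltInner p m 0 1 m.toNat
        pvAltOuter (count * (r.2.1 + 1))
          (total * PySem.Int.floordiv (r.2.2 * p - 1) (p - 1)) r.1 (p + 1) fuel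
      else pvAltOuter count total m (p + 1) fuel
    else (count, total, m)

def numberOfDivisorsAndSum_alt (n : Int) : List Int :=
  if n ≤ 0 then [0, 0]
  else
    let r := pvAltOuter 1 1 n 2 (n.toNat + 1)
    if 1 < r.2.2 then [r.1 * 2, r.2.1 * (r.2.2 + 1)] else [r.1, r.2.1]

-- ===== PRECONDITION & SPEC =====
def Spec_numberOfDivisorsAndSum (n : Int) (out : List Int) : Prop := out = numberOfDivisorsAndSum_alt n
instance (n : Int) (out : List Int) : Decidable (Spec_numberOfDivisorsAndSum n out) := by unfold Spec_numberOfDivisorsAndSum; infer_instance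

-- ===== CLAIM (what is proved, stated in full; the proofs are below) =====
def Claim_equal_numberOfDivisorsAndSum : Prop := ∀ (n : Int), Dom_numberOfDivisorsAndSum n → Spec_numberOfDivisorsAndSum n (numberOfDivisorsAndSum n)

-- ===== LEMMAS AND PROOFS =====

-- divisor count and divisor sum (as Int, via toNat), the common value of both programs
def pvD (m : Int) : Int := (m.toNat.divisors.card : Int)
def pvS (m : Int) : Int := ((∑ d ∈ m.toNat.divisors, d : ℕ) : Int)

-- the loop keeps the set duplicate-free
theorem pvLoop_nodup (n : Int) (fuel : Nat) (factors : PySem.Set Int) (i : Int)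
    (h : factors.Nodup) : (numberOfDivisorsAndSumLoop n factors i fuel).Nodup := by
  induction fuel generalizing factors i with
  | zero => exact h
  | succ fuel ih =>
    rw [numberOfDivisorsAndSumLoop]
    split
    · apply ih
      split
      · apply PySem.Set.nodup_add; apply PySem.Set.nodup_add; exact h
      · exact h
    · exact h

-- membership in the loop result (enough fuel: n < i + fuel)
theorem pvLoop_mem (n : Int) (fuel : Nat) (factors : PySem.Set Int) (i : Int) (x : Int)
    (hi : 1 ≤ i) (hf : n < i + fuel) :
    x ∈ numberOfDivisorsAndSumLoop n factors i fuel ↔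
      x ∈ factors ∨ ∃ j, i ≤ j ∧ j ^ 2 ≤ n ∧ PySem.Int.mod n j = 0 ∧
        (x = j ∨ x = PySem.Int.floordiv n j) := by
  induction fuel generalizing factors i with
  | zero =>
    rw [numberOfDivisorsAndSumLoop]
    constructor
    · exact Or.inl
    · rintro (hx | ⟨j, hj1, hj2, hj3, hj4⟩)
      · exact hx
      · exfalso; push_cast at hf; nlinarith [sq_nonneg (j - 1)]
  | succ fuel ih =>
    rw [numberOfDivisorsAndSumLoop]
    split
    · rename_i hle
      have hin : i ≤ n := by nlinarith [sq_nonneg (i - 1)]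
      rw [ih _ (i + 1) (by omega) (by omega)]
      by_cases hm : PySem.Int.mod n i = 0
      · simp only [hm, beq_self_eq_true, if_true, PySem.Set.mem_add]
        constructor
        · rintro (((hfa | hx) | hx) | ⟨j, hj1, hj2, hj3, hj4⟩)
          · exact Or.inl hfa
          · exact Or.inr ⟨i, le_refl i, hle, hm, Or.inl hx⟩
          · exact Or.inr ⟨i, le_refl i, hle, hm, Or.inr hx⟩
          · exact Or.inr ⟨j, by omega, hj2, hj3, hj4⟩
        · rintro (hfa | ⟨j, hj1, hj2, hj3, hj4⟩)
          · exact Or.inl (Or.inl (Or.inl hfa))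
          · rcases eq_or_lt_of_le hj1 with heq | hlt
            · rcases hj4 with hx | hx
              · exact Or.inl (Or.inl (Or.inr (heq ▸ hx)))
              · exact Or.inl (Or.inr (heq ▸ hx))
            · exact Or.inr ⟨j, by omega, hj2, hj3, hj4⟩
      · have hmne : (PySem.Int.mod n i == 0) = false := by simpa using hm
        simp only [hmne, Bool.false_eq_true, if_false]
        constructor
        · rintro (hfa | ⟨j, hj1, hj2, hj3, hj4⟩)
          · exact Or.inl hfa
          · exact Or.inr ⟨j, by omega, hj2, hj3, hj4⟩
        · rintro (hfa | ⟨j, hj1, hj2, hj3, hj4⟩)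
          · exact Or.inl hfa
          · rcases eq_or_lt_of_le hj1 with heq | hlt
            · exact absurd (heq ▸ hj3) hm
            · exact Or.inr ⟨j, by omega, hj2, hj3, hj4⟩
    · rename_i hle
      constructor
      · exact Or.inl
      · rintro (hfa | ⟨j, hj1, hj2, hj3, hj4⟩)
        · exact hfa
        · exfalso
          have : i ^ 2 ≤ j ^ 2 := by nlinarith
          nlinarith

-- the pair form characterises exactly the divisors 1..n
theorem pvDiv_char (n x : Int) :
    (∃ j, 1 ≤ j ∧ j ^ 2 ≤ n ∧ PySem.Int.mod n j = 0 ∧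
        (x = j ∨ x = PySem.Int.floordiv n j)) ↔
      (1 ≤ x ∧ x < n + 1 ∧ PySem.Int.mod n x = 0) := by
  constructor
  · rintro ⟨j, hj1, hj2, hjm, hx⟩
    have hjpos : 0 < j := hj1
    have hn1 : 1 ≤ n := by nlinarith
    have hdvd : j ∣ n := (PySem.Int.mod_eq_zero_iff_dvd n j).mp hjm
    obtain ⟨k, hk⟩ := hdvd
    have hk1 : 1 ≤ k := by nlinarith
    have hfd : PySem.Int.floordiv n j = k := by
      rw [PySem.Int.floordiv_eq_ediv_of_pos hjpos, hk,
        Int.mul_ediv_cancel_left _ (by omega)]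
    rcases hx with hx | hx
    · subst hx
      exact ⟨hj1, by nlinarith, hjm⟩
    · rw [hfd] at hx; subst hx
      refine ⟨hk1, by nlinarith, ?_⟩
      rw [PySem.Int.mod_eq_zero_iff_dvd]
      exact ⟨j, by linarith [hk]⟩
  · rintro ⟨hx1, hx2, hxm⟩
    have hn1 : 1 ≤ n := by omega
    have hdvd : x ∣ n := (PySem.Int.mod_eq_zero_iff_dvd n x).mp hxm
    obtain ⟨k, hk⟩ := hdvd
    have hk1 : 1 ≤ k := by nlinarith
    by_cases hsq : x ^ 2 ≤ n
    · exact ⟨x, hx1, hsq, hxm, Or.inl rfl⟩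
    · refine ⟨k, hk1, by nlinarith, ?_, Or.inr ?_⟩
      · rw [PySem.Int.mod_eq_zero_iff_dvd]
        exact ⟨x, by linarith [hk, mul_comm x k]⟩
      · rw [PySem.Int.floordiv_eq_ediv_of_pos (by omega), hk, mul_comm,
          Int.mul_ediv_cancel_left _ (by omega)]

-- A's divisor list (the filtered range) has length pvD n and sum pvS n (n ≥ 1)
theorem pvA_bridge (n : Int) (hn : 1 ≤ n) :
    (((PySem.List.pyRange 1 (n + 1) 1).filter
        (fun i => PySem.Int.mod n i == 0)).length : Int) = pvD n ∧
      ((PySem.List.pyRange 1 (n + 1) 1).filter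
        (fun i => PySem.Int.mod n i == 0)).sum = pvS n := by
  set l := (PySem.List.pyRange 1 (n + 1) 1).filter
    (fun i => PySem.Int.mod n i == 0) with hl
  have hmem : ∀ x ∈ l, 1 ≤ x ∧ x ≤ n ∧ x ∣ n := by
    intro x hx
    rw [hl, List.mem_filter, PySem.List.mem_pyRange_one] at hx
    obtain ⟨⟨h1, h2⟩, h3⟩ := hx
    rw [beq_iff_eq, PySem.Int.mod_eq_zero_iff_dvd] at h3
    exact ⟨h1, by omega, h3⟩
  have hnd : l.Nodup := (PySem.List.nodup_pyRange_one 1 (n + 1)).filter _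
  have hLnd : (l.map Int.toNat).Nodup := by
    refine List.Nodup.map_on ?_ hnd
    intro x hx y hy hxy
    have h1 := (hmem x hx).1
    have h2 := (hmem y hy).1
    omega
  have hfin : (l.map Int.toNat).toFinset = n.toNat.divisors := by
    ext x
    simp only [List.mem_toFinset, List.mem_map, Nat.mem_divisors]
    constructor
    · rintro ⟨y, hy, rfl⟩
      obtain ⟨h1, h2, h3⟩ := hmem y hy
      have hy' : ((y.toNat : ℤ)) = y := Int.toNat_of_nonneg (by omega)
      have hn' : ((n.toNat : ℤ)) = n := Int.toNat_of_nonneg (by omega)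
      refine ⟨?_, by omega⟩
      rw [← hy', ← hn'] at h3
      exact_mod_cast h3
    · rintro ⟨hdvd, hne⟩
      refine ⟨(x : ℤ), ?_, Int.toNat_natCast x⟩
      rw [hl, List.mem_filter, PySem.List.mem_pyRange_one, beq_iff_eq,
        PySem.Int.mod_eq_zero_iff_dvd]
      have hxpos : 0 < x := Nat.pos_of_dvd_of_pos hdvd (by omega)
      have hxle : x ≤ n.toNat := Nat.le_of_dvd (by omega) hdvd
      have hdvd' : (x : ℤ) ∣ n := by
        rw [← Int.toNat_of_nonneg (show (0 : ℤ) ≤ n by omega)]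
        exact_mod_cast hdvd
      exact ⟨⟨by exact_mod_cast hxpos, by omega⟩, hdvd'⟩
  constructor
  · unfold pvD
    rw [← hfin, List.toFinset_card_of_nodup hLnd, List.length_map]
  · unfold pvS
    rw [← hfin, List.sum_toFinset _ hLnd]
    have hback : (l.map Int.toNat).map (fun x : ℕ => (x : ℤ)) = l := by
      rw [List.map_map]
      conv_rhs => rw [← List.map_id l]
      refine List.map_congr_left ?_
      intro x hx
      exact Int.toNat_of_nonneg (by have := (hmem x hx).1; omega)
    have hid : List.map (fun d : ℕ => d) (List.map Int.toNat l) = List.map Int.toNat l := by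
      simp
    rw [Nat.cast_list_sum, hid, hback]

-- the inner while loop extracts the full power of p
theorem pvInner_eq (p : Int) (hp : 2 ≤ p) (fuel : Nat) :
    ∀ (m e pk : Int), 1 ≤ m → m.toNat ≤ fuel →
      ∃ k : ℕ, pvAltInner p m e pk fuel = (m / p ^ k, e + (k : Int), pk * p ^ k) ∧
        (p ^ k ∣ m) ∧ ¬ (p ∣ m / p ^ k) := by
  induction fuel with
  | zero =>
    intro m e pk hm hfuel
    omega
  | succ fuel ih =>
    intro m e pk hm hfuel
    rw [pvAltInner]
    by_cases hd : p ∣ m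
    · have hdb : (PySem.Int.mod m p == 0) = true := by
        simp [PySem.Int.mod_eq_zero_iff_dvd, hd]
      rw [if_pos hdb, PySem.Int.floordiv_eq_ediv_of_pos (by omega)]
      obtain ⟨m₂, hm₂⟩ := hd
      have hq : m / p = m₂ := by rw [hm₂, Int.mul_ediv_cancel_left _ (by omega)]
      have hm₂1 : 1 ≤ m₂ := by nlinarith
      have hlt : m₂ < m := by nlinarith
      obtain ⟨k, hrec, hdvd, hnd⟩ := ih m₂ (e + 1) (pk * p) hm₂1 (by omega)
      have hkey : m / p ^ (k + 1) = m₂ / p ^ k := by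
        rw [hm₂, pow_succ, mul_comm (p ^ k) p]
        exact Int.mul_ediv_mul_of_pos m₂ (p ^ k) (by omega)
      refine ⟨k + 1, ?_, ?_, ?_⟩
      · rw [hq, hrec, hkey]
        refine congrArg₂ _ rfl (congrArg₂ _ (by push_cast; ring) ?_)
        rw [pow_succ]; ring
      · rw [hm₂, pow_succ, mul_comm (p ^ k) p]
        exact mul_dvd_mul_left p hdvd
      · rw [hkey]; exact hnd
    · have hdb : (PySem.Int.mod m p == 0) = false := by
        simp [PySem.Int.mod_eq_zero_iff_dvd, hd]
      rw [if_neg (by simp [hdb])]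
      exact ⟨0, by simp, by simp, by simpa using hd⟩

-- a divisor p of m that is minimal among all divisors ≥ 2 is prime
theorem pvPrime_of_min (p m : Int) (hp : 2 ≤ p) (hm : 1 ≤ m) (hd : p ∣ m)
    (hmin : ∀ q : Int, 2 ≤ q → q ∣ m → p ≤ q) : p.toNat.Prime := by
  have hP : ((p.toNat : ℤ)) = p := Int.toNat_of_nonneg (by omega)
  have hP2 : 2 ≤ p.toNat := by omega
  have hr := Nat.minFac_prime (n := p.toNat) (by omega)
  have hrd : ((p.toNat.minFac : ℤ)) ∣ m := by
    refine dvd_trans ?_ hd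
    rw [← hP]
    exact_mod_cast Nat.minFac_dvd p.toNat
  have hge := hmin _ (by exact_mod_cast hr.two_le) hrd
  have hle : p.toNat.minFac ≤ p.toNat := Nat.minFac_le (by omega)
  have : p.toNat.minFac = p.toNat := by omega
  rwa [this] at hr

-- stripping the full power of a prime multiplies count by k+1 and sum by the geometric sum
theorem pvDS_mul (p m' : Int) (k : ℕ) (hp : 2 ≤ p) (hP : p.toNat.Prime)
    (hm' : 1 ≤ m') (hnd : ¬ p ∣ m') :
    pvD (p ^ k * m') = ((k : Int) + 1) * pvD m' ∧
      pvS (p ^ k * m') = (∑ i ∈ Finset.range (k + 1), p ^ i) * pvS m' := by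
  have h1 : ((p.toNat : ℤ)) = p := Int.toNat_of_nonneg (by omega)
  have h2 : ((m'.toNat : ℤ)) = m' := Int.toNat_of_nonneg (by omega)
  have hcast : (p ^ k * m').toNat = p.toNat ^ k * m'.toNat := by
    have : ((p.toNat ^ k * m'.toNat : ℕ) : ℤ) = p ^ k * m' := by push_cast [h1, h2]; ring
    rw [← this, Int.toNat_natCast]
  have hPnd : ¬ p.toNat ∣ m'.toNat := by
    intro hdd
    apply hnd
    rw [← h1, ← h2]
    exact_mod_cast hdd
  have hcop : Nat.Coprime (p.toNat ^ k) m'.toNat :=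
    Nat.Coprime.pow_left k ((Nat.Prime.coprime_iff_not_dvd hP).mpr hPnd)
  constructor
  · unfold pvD
    rw [hcast, Nat.Coprime.card_divisors_mul hcop, Nat.divisors_prime_pow hP,
      Finset.card_map, Finset.card_range]
    push_cast
    ring
  · unfold pvS
    rw [hcast, Nat.Coprime.sum_divisors_mul hcop, Nat.sum_divisors_prime_pow hP]
    push_cast [h1]
    ring

-- the Python expression (pk*p - 1) // (p - 1) is the geometric sum 1 + p + … + p^k
theorem pvGeom (p : Int) (k : ℕ) (hp : 2 ≤ p) :
    PySem.Int.floordiv (p ^ k * p - 1) (p - 1) = ∑ i ∈ Finset.range (k + 1), p ^ i := by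
  rw [PySem.Int.floordiv_eq_ediv_of_pos (by omega)]
  have hg := geom_sum_mul p (k + 1)
  have : p ^ k * p - 1 = (∑ i ∈ Finset.range (k + 1), p ^ i) * (p - 1) := by
    rw [hg, pow_succ]
  rw [this, Int.mul_ediv_cancel _ (by omega)]

-- divisor count and sum of a prime
theorem pvDS_prime (m : Int) (hm : 2 ≤ m) (hP : m.toNat.Prime) :
    pvD m = 2 ∧ pvS m = m + 1 := by
  have h2 : ((m.toNat : ℤ)) = m := Int.toNat_of_nonneg (by omega)
  have hne : (1 : ℕ) ≠ m.toNat := by omega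
  unfold pvD pvS
  rw [Nat.Prime.divisors hP]
  constructor
  · rw [Finset.card_insert_of_notMem (by simp only [Finset.mem_singleton]; omega),
      Finset.card_singleton]
    norm_num
  · rw [Finset.sum_pair hne]
    push_cast [h2]
    ring

-- divisor count and sum of 1
theorem pvDS_one : pvD 1 = 1 ∧ pvS 1 = 1 := by
  constructor <;> simp [pvD, pvS]

-- the outer loop followed by the final fix-up computes count/sum multiplicatively
theorem pvOuter_eq (fuel : Nat) (c t m p : Int) (hm : 1 ≤ m) (hp : 2 ≤ p)
    (hmin : ∀ q : Int, 2 ≤ q → q ∣ m → p ≤ q) (hf : m < p + fuel) :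
    (if 1 < (pvAltOuter c t m p fuel).2.2 then
        ((pvAltOuter c t m p fuel).1 * 2,
         (pvAltOuter c t m p fuel).2.1 * ((pvAltOuter c t m p fuel).2.2 + 1))
      else ((pvAltOuter c t m p fuel).1, (pvAltOuter c t m p fuel).2.1))
      = (c * pvD m, t * pvS m) := by
  induction fuel generalizing c t m p with
  | zero =>
    have hm1 : m = 1 := by
      by_contra h
      have := hmin m (by omega) dvd_rfl
      omega
    subst hm1
    rw [pvAltOuter]
    norm_num [pvDS_one.1, pvDS_one.2]
  | succ fuel ih =>
    rw [pvAltOuter]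
    by_cases hloop : p * p ≤ m
    · rw [if_pos hloop]
      by_cases hd : p ∣ m
      · have hdb : (PySem.Int.mod m p == 0) = true := by
          simp [PySem.Int.mod_eq_zero_iff_dvd, hd]
        rw [if_pos hdb]
        obtain ⟨k, hrec, hdvd, hnd⟩ := pvInner_eq p hp m.toNat m 0 1 hm le_rfl
        rw [hrec]
        have hPrime : p.toNat.Prime := pvPrime_of_min p m hp hm hd hmin
        set m' := m / p ^ k with hm'def
        have hsplit : p ^ k * m' = m := by
          rw [hm'def, mul_comm]
          exact Int.ediv_mul_cancel hdvd
        have hm'1 : 1 ≤ m' := by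
          by_contra h
          rw [not_le] at h
          have hpk : (0 : ℤ) < p ^ k := pow_pos (by omega) k
          nlinarith [hsplit]
        have hm'dvd : m' ∣ m := ⟨p ^ k, by rw [← hsplit]; ring⟩
        have hm'le : m' ≤ m := Int.le_of_dvd (by omega) hm'dvd
        have hmin' : ∀ q : Int, 2 ≤ q → q ∣ m' → p + 1 ≤ q := by
          intro q hq hqd
          have hge := hmin q hq (hqd.trans hm'dvd)
          rcases eq_or_lt_of_le hge with heq | hlt
          · exact absurd (heq ▸ hqd) hnd
          · omega
        have hIH := ih (c * (0 + (k : Int) + 1))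
          (t * PySem.Int.floordiv (1 * p ^ k * p - 1) (p - 1)) m' (p + 1)
          hm'1 (by omega) hmin' (by omega)
        simp only at hIH ⊢
        rw [hIH]
        obtain ⟨hDm, hSm⟩ := pvDS_mul p m' k hp hPrime hm'1 hnd
        rw [← hsplit, hDm, hSm, one_mul, pvGeom p k hp]
        rw [Prod.mk.injEq]
        constructor <;> ring
      · have hdb : (PySem.Int.mod m p == 0) = false := by
          simp [PySem.Int.mod_eq_zero_iff_dvd, hd]
        simp only [hdb, Bool.false_eq_true, if_false]
        refine ih c t m (p + 1) hm (by omega) ?_ (by omega)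
        intro q hq hqd
        have hge := hmin q hq hqd
        rcases eq_or_lt_of_le hge with heq | hlt
        · exact absurd (heq ▸ hqd) hd
        · omega
    · rw [if_neg hloop]
      rcases eq_or_lt_of_le hm with hm1 | hm2
      · rw [← hm1]
        norm_num [pvDS_one.1, pvDS_one.2]
      · have hMP : m.toNat.Prime := by
          by_contra hnp
          have hsq := Nat.minFac_sq_le_self (n := m.toNat) (by omega) hnp
          have hr := Nat.minFac_prime (n := m.toNat) (by omega)
          have hrd : ((m.toNat.minFac : ℤ)) ∣ m := by
            have h2 : ((m.toNat : ℤ)) = m := Int.toNat_of_nonneg (by omega)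
            rw [← h2]
            exact_mod_cast Nat.minFac_dvd m.toNat
          have hge := hmin _ (by exact_mod_cast hr.two_le) hrd
          have : (m.toNat.minFac : ℤ) * (m.toNat.minFac : ℤ) ≤ m := by
            have h2 : ((m.toNat : ℤ)) = m := Int.toNat_of_nonneg (by omega)
            rw [← h2]
            exact_mod_cast (by nlinarith [sq_nonneg m.toNat.minFac] :
              m.toNat.minFac * m.toNat.minFac ≤ m.toNat)
          nlinarith
        obtain ⟨hD2, hSm⟩ := pvDS_prime m (by omega) hMP
        simp only
        rw [if_pos (by omega), hD2, hSm]

-- ===== VERDICT (by name: the statement is the Claim_ definition above) =====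
theorem numberOfDivisorsAndSum_spec : Claim_equal_numberOfDivisorsAndSum := by
  intro n _
  have hperm : (numberOfDivisorsAndSumLoop n PySem.Set.empty 1 (n.toNat + 1)).Perm
      ((PySem.List.pyRange 1 (n + 1) 1).filter (fun i => PySem.Int.mod n i == 0)) := by
    rw [List.perm_ext_iff_of_nodup]
    · intro x
      rw [pvLoop_mem n (n.toNat + 1) PySem.Set.empty 1 x (by norm_num) (by omega)]
      simp only [PySem.Set.empty, List.not_mem_nil, false_or]
      rw [pvDiv_char, List.mem_filter, PySem.List.mem_pyRange_one, beq_iff_eq]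
      tauto
    · exact pvLoop_nodup n (n.toNat + 1) PySem.Set.empty 1 List.nodup_nil
    · exact (PySem.List.nodup_pyRange_one 1 (n + 1)).filter _
  unfold Spec_numberOfDivisorsAndSum
  simp only [numberOfDivisorsAndSum, numberOfDivisorsAndSum_alt]
  by_cases hn : n ≤ 0
  · rw [if_pos hn]
    have hemp : (PySem.List.pyRange 1 (n + 1) 1).filter
        (fun i => PySem.Int.mod n i == 0) = [] := by
      apply List.eq_nil_iff_forall_not_mem.mpr
      intro x hx
      have := (List.mem_filter.mp hx).1
      rw [PySem.List.mem_pyRange_one] at this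
      omega
    rw [hperm.length_eq, ← List.sum_eq_foldl, hperm.sum_eq, hemp]
    simp
  · rw [not_le] at hn
    rw [if_neg (by omega)]
    obtain ⟨hlen, hsum⟩ := pvA_bridge n hn
    have houter := pvOuter_eq (n.toNat + 1) 1 1 n 2 hn (by norm_num)
      (fun q hq _ => hq) (by omega)
    rw [hperm.length_eq, ← List.sum_eq_foldl, hperm.sum_eq, hlen, hsum]
    by_cases hc : 1 < (pvAltOuter 1 1 n 2 (n.toNat + 1)).2.2
    · rw [if_pos hc] at houter ⊢
      rw [Prod.mk.injEq] at houter
      rw [houter.1, houter.2]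
      simp
    · rw [if_neg hc] at houter ⊢
      rw [Prod.mk.injEq] at houter
      rw [houter.1, houter.2]
      simp
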